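-- pv_equiv track=rewrite | github.com/Galahad3x/AdventOfCode2019 | day6/day6.py | calculate_transfers
-- ===== SOURCE A (Python) =====
-- def calculate_transfers(orbit_dic, key, common_key):
--     if key in orbit_dic:
--         if orbit_dic[key] == common_key:
--             return 0
--         else:
--             return 1 + calculate_transfers(orbit_dic, orbit_dic[key], common_key)
--     else:
--         return 0
-- ===== SOURCE B (Python) =====
-- def ancestor_path(orbit_dic, key, common_key):
--     # the keys visited from `key` up to (not including) the one whose parent is
--     # common_key, or up to the first key with no parent
--     path = [key]
--     while path[-1] in orbit_dic and orbit_dic[path[-1]] != common_key: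
--         path.append(orbit_dic[path[-1]])
--     return path
--
-- def calculate_transfers(orbit_dic, key, common_key):
--     return len(ancestor_path(orbit_dic, key, common_key)) - 1
-- ===== Notes on version B (the rewrite author's own statement) =====
-- stated objective: alternative
-- what changed: Instead of recursively summing 1 per step, B materializes the visited transfer path as an explicit list and returns its length minus one.
import Mathlib
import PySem

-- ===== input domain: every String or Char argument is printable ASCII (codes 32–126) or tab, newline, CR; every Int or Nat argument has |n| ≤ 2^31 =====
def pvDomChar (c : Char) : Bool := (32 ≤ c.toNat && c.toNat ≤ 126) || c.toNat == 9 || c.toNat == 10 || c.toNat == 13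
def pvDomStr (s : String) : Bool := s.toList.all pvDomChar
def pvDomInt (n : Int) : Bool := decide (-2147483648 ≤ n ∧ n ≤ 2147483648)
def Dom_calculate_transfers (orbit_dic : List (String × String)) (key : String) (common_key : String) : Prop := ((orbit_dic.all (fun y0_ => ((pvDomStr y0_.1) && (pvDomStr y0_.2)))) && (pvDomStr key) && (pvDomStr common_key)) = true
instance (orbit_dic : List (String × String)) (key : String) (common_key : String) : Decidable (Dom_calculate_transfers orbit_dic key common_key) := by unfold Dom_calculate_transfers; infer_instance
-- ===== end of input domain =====

-- B materializes the visited transfer path as an explicit list and returns its length minus one,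
-- instead of A's recursion that sums 1 per step.
-- Python A diverges (RecursionError) on cyclic parent chains; Pre_ excludes exactly those inputs.

-- ===== PORT A =====
-- first-match association-list lookup: Python's `orbit_dic[key]` / `key in orbit_dic`
def pvLookup : List (String × String) → String → Option String
  | [], _ => none
  | (k, v) :: rest, x => if k == x then some v else pvLookup rest x

-- fuel makes the recursion total; orbit_dic.length + 1 steps suffice on every input Pre_ admits
def calculate_transfers_go (orbit_dic : List (String × String)) (common_key : String) :
    Nat → String → Int
  | 0, _ => 0
  | fuel + 1, key =>
    match pvLookup orbit_dic key with
    | none => 0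
    | some v => if v == common_key then 0 else 1 + calculate_transfers_go orbit_dic common_key fuel v

def calculate_transfers (orbit_dic : List (String × String)) (key : String) (common_key : String) : Int :=
  calculate_transfers_go orbit_dic common_key (orbit_dic.length + 1) key

-- ===== PORT B =====
-- ancestor_path: the explicit list of visited keys (same fuel bound for totality)
def ancestor_path_go (orbit_dic : List (String × String)) (common_key : String) :
    Nat → String → List String
  | 0, key => [key]
  | fuel + 1, key =>
    match orbit_dic.lookup key with
    | none => [key]
    | some v => if v == common_key then [key] else key :: ancestor_path_go orbit_dic common_key fuel v

def calculate_transfers_alt (orbit_dic : List (String × String)) (key : String) (common_key : String) : Int :=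
  ((ancestor_path_go orbit_dic common_key (orbit_dic.length + 1) key).length : Int) - 1

-- ===== PRECONDITION & SPEC =====
-- one parent-pointer step (missing keys stay put, which Pre_'s stop condition covers)
def pvStep (orbit_dic : List (String × String)) (k : String) : String :=
  (orbit_dic.lookup k).getD k

-- Pre_ = the chain from key reaches a stop (missing key, or value = common_key) within
-- orbit_dic.length steps; by pigeonhole this holds iff Python A terminates (otherwise it cycles).
def Pre_calculate_transfers (orbit_dic : List (String × String)) (key : String) (common_key : String) : Prop :=
  ∃ n ∈ Finset.range (orbit_dic.length + 1),
    (orbit_dic.lookup ((pvStep orbit_dic)^[n] key) = none ∨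
     orbit_dic.lookup ((pvStep orbit_dic)^[n] key) = some common_key)

instance (orbit_dic : List (String × String)) (key : String) (common_key : String) : Decidable (Pre_calculate_transfers orbit_dic key common_key) := by unfold Pre_calculate_transfers; infer_instance

def pvWitness_calculate_transfers : (List (String × String)) × String × String :=
  ([("B", "COM"), ("C", "B"), ("D", "C")], "D", "COM")

def Spec_calculate_transfers (orbit_dic : List (String × String)) (key : String) (common_key : String) (out : Int) : Prop := out = calculate_transfers_alt orbit_dic key common_key
instance (orbit_dic : List (String × String)) (key : String) (common_key : String) (out : Int) : Decidable (Spec_calculate_transfers orbit_dic key common_key out) := by unfold Spec_calculate_transfers; infer_instance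

-- ===== CLAIM (what is proved, stated in full; the proofs are below) =====
def Claim_equal_calculate_transfers : Prop := ∀ (orbit_dic : List (String × String)) (key : String) (common_key : String), Dom_calculate_transfers orbit_dic key common_key → Pre_calculate_transfers orbit_dic key common_key → Spec_calculate_transfers orbit_dic key common_key (calculate_transfers orbit_dic key common_key)

-- ===== LEMMAS AND PROOFS =====

-- the two lookups agree
theorem pvLookup_eq_lookup (orbit_dic : List (String × String)) (x : String) :
    pvLookup orbit_dic x = orbit_dic.lookup x := by
  induction orbit_dic with
  | nil => rfl
  | cons p rest ih =>
    obtain ⟨k, v⟩ := p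
    have hkx : (k == x) = (x == k) := by by_cases h : k = x <;> simp [h, Ne.symm, eq_comm]
    simp only [pvLookup, List.lookup, ih, hkx]
    rcases x == k with _ | _ <;> rfl

-- the path's length minus one is A's recursive count, for any fuel
theorem path_length_eq (orbit_dic : List (String × String)) (common_key : String) :
    ∀ (fuel : Nat) (key : String),
      ((ancestor_path_go orbit_dic common_key fuel key).length : Int) - 1 =
        calculate_transfers_go orbit_dic common_key fuel key := by
  intro fuel
  induction fuel with
  | zero => intro key; simp [ancestor_path_go, calculate_transfers_go]
  | succ n ih =>
    intro key
    simp only [ancestor_path_go, calculate_transfers_go, pvLookup_eq_lookup]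
    cases h : orbit_dic.lookup key with
    | none => simp
    | some v =>
      by_cases hv : v == common_key
      · simp [hv]
      · simp only [hv, Bool.false_eq_true, ite_false, List.length_cons]
        push_cast
        rw [← ih v]
        ring

-- ===== VERDICT (by name: the statement is the Claim_ definition above) =====
theorem calculate_transfers_spec : Claim_equal_calculate_transfers := by
  intro orbit_dic key common_key _ _
  unfold Spec_calculate_transfers calculate_transfers calculate_transfers_alt
  rw [path_length_eq]
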